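-- pv_equiv track=rewrite | github.com/walkerdb/renpubs | parser.py | generate_markdown_table_for_count
-- ===== SOURCE A (Python) =====
-- from collections import Counter
--
-- def generate_markdown_table_for_count(raw_array_to_count, headers):
--     def sort_by_last_name(x):
--         return x.rstrip("1234567890:| ").split(" ")[-1]
--
--     def sort_by_count(x):
--         return -int(x.split(" ")[-2].strip(" |"))
--
--     formatted_rows = ["| {} | {} |".format(composer, count) for composer, count in Counter(raw_array_to_count).most_common()]
--     sorted_rows = sorted(sorted(sorted(formatted_rows), key=sort_by_last_name), key=sort_by_count)
--     composer_count_table = "| {} |\n".format(" | ".join(headers))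
--     composer_count_table += "| -------- | -------- |\n"
--     composer_count_table += "\n".join(sorted_rows)
--
--     return composer_count_table
-- ===== SOURCE B (Python) =====
-- from collections import Counter
--
--
-- def generate_markdown_table_for_count(raw_array_to_count, headers):
--     # Sort the (composer, count) pairs once with a composite key instead of
--     # rendering rows first and re-parsing them inside three stacked sorts.
--     def sort_key(item):
--         composer, count = item
--         row = "| {} | {} |".format(composer, count)
--         last_name = composer.rstrip("1234567890:| ").split(" ")[-1]
--         return (-count, last_name, row)
--
--     rows = ["| {} | {} |".format(composer, count)
--             for composer, count in sorted(Counter(raw_array_to_count).items(), key=sort_key)]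
--     table = "| {} |\n".format(" | ".join(headers))
--     table += "| -------- | -------- |\n"
--     table += "\n".join(rows)
--     return table
-- ===== Notes on version B (the rewrite author's own statement) =====
-- stated objective: simpler
-- what changed: B sorts the (composer, count) pairs once with a composite key (-count, stripped last-name token, rendered row) instead of rendering rows first and then stacking three stable sorts that re-parse the count and last name back out of the rendered strings.
import Mathlib
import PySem

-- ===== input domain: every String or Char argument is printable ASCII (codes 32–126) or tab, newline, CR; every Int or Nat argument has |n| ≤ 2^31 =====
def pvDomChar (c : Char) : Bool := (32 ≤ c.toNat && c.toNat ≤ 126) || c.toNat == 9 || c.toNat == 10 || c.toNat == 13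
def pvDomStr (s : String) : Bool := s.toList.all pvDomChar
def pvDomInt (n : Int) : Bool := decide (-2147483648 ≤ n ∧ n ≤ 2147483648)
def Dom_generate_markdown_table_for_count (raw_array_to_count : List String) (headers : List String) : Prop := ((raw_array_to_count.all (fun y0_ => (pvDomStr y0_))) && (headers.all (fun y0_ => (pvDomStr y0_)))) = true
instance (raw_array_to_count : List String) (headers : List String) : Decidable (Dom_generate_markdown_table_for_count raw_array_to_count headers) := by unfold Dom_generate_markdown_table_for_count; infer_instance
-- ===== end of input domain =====

-- B sorts the (composer, count) pairs once with a composite key instead of rendering rows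
-- first and re-sorting the rendered strings three times re-parsing the keys out of them.

-- ===== PORT A =====

-- str.rstrip(chars) ported by hand (PySem.Chars.rstrip covers only the no-argument form):
-- exact — drops exactly the maximal trailing run of characters belonging to `chars`.
def pvRstrip (s : List Char) (chars : List Char) : List Char :=
  (s.reverse.dropWhile (fun c => chars.contains c)).reverse

-- the literal "1234567890:| " of A
def pvStripSet : List Char := ['1','2','3','4','5','6','7','8','9','0',':','|',' ']

-- "| {} | {} |".format(composer, count)
def pvFormatRow (composer : String) (count : Int) : String :=
  String.ofList (['|',' '] ++ composer.toList ++ [' ','|',' '] ++ PySem.Int.toChars count ++ [' ','|'])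

-- def sort_by_last_name(x): return x.rstrip("1234567890:| ").split(" ")[-1]
-- ([-1] exists: split always returns a nonempty list, so .getD "" is never the default)
def pvSortByLastName (x : String) : String :=
  String.ofList (((PySem.List.pyGet? (PySem.Chars.splitOn (pvRstrip x.toList pvStripSet) [' ']) (-1)).getD []))

-- int(s) ported by hand as a digit fold: exact here, because in this program the parsed token
-- is always str(count) of a Counter count (a nonempty pure-digit string), on which int() is this fold.
def pvParseInt (cs : List Char) : Int :=
  cs.foldl (fun a c => 10 * a + ((c.toNat : Int) - 48)) 0

-- def sort_by_count(x): return -int(x.split(" ")[-2].strip(" |"))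
-- ([-2] exists: a formatted row always splits into at least five tokens, so .getD "" never fires)
def pvSortByCount (x : String) : Int :=
  -(pvParseInt (PySem.Chars.stripChars ((PySem.List.pyGet? (PySem.Chars.splitOn x.toList [' ']) (-2)).getD []) [' ','|']))

-- "| -------- | -------- |\n"
def pvSepRow : List Char :=
  ['|',' ','-','-','-','-','-','-','-','-',' ','|',' ','-','-','-','-','-','-','-','-',' ','|','\n']

def generate_markdown_table_for_count (raw_array_to_count : List String) (headers : List String) : String :=
  -- Counter(raw).most_common() = sorted(counter.items(), key=itemgetter(1), reverse=True) (stable)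
  let most_common := PySem.List.sorted (PySem.Dict.counter raw_array_to_count).items (fun p => p.2) true
  let formatted_rows := most_common.map (fun p => pvFormatRow p.1 p.2)
  let sorted_rows := PySem.List.sorted (PySem.List.sorted (PySem.List.sorted formatted_rows (fun x => x) false) pvSortByLastName false) pvSortByCount false
  let table := ['|',' '] ++ (PySem.Str.join " | " headers).toList ++ [' ','|','\n'] ++ pvSepRow
  String.ofList (table ++ (PySem.Str.join "\n" sorted_rows).toList)

-- ===== PORT B =====

-- composer.rstrip("1234567890:| ").split(" ")[-1]  computed from the composer alone
def pvLastName (composer : String) : String :=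
  String.ofList (((PySem.List.pyGet? (PySem.Chars.splitOn (pvRstrip composer.toList pvStripSet) [' ']) (-1)).getD []))

-- the composite sort key (-count, last_name, row): Python's tuple comparison is lexicographic
def pvKeyB (p : String × Int) : Lex (Int × Lex (String × String)) :=
  toLex (-p.2, toLex (pvLastName p.1, pvFormatRow p.1 p.2))

def generate_markdown_table_for_count_alt (raw_array_to_count : List String) (headers : List String) : String :=
  let pairs := PySem.List.sorted (PySem.Dict.counter raw_array_to_count).items pvKeyB false
  let rows := pairs.map (fun p => pvFormatRow p.1 p.2)
  let table := ['|',' '] ++ (PySem.Str.join " | " headers).toList ++ [' ','|','\n'] ++ pvSepRow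
  String.ofList (table ++ (PySem.Str.join "\n" rows).toList)

-- ===== PRECONDITION & SPEC =====
def Spec_generate_markdown_table_for_count (raw_array_to_count : List String) (headers : List String) (out : String) : Prop := out = generate_markdown_table_for_count_alt raw_array_to_count headers
instance (raw_array_to_count : List String) (headers : List String) (out : String) : Decidable (Spec_generate_markdown_table_for_count raw_array_to_count headers out) := by unfold Spec_generate_markdown_table_for_count; infer_instance

-- ===== CLAIM (what is proved, stated in full; the proofs are below) =====
def Claim_equal_generate_markdown_table_for_count : Prop := ∀ (raw_array_to_count : List String) (headers : List String), Dom_generate_markdown_table_for_count raw_array_to_count headers → Spec_generate_markdown_table_for_count raw_array_to_count headers (generate_markdown_table_for_count raw_array_to_count headers)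

-- ===== LEMMAS AND PROOFS =====

-- the combined key by which A's three stacked stable sorts end up ordering the rows
def pvKeyA (x : String) : Lex (Int × Lex (String × String)) :=
  toLex (pvSortByCount x, toLex (pvSortByLastName x, x))

theorem pvKeyA_injective : Function.Injective pvKeyA := by
  intro a b h
  have := congrArg (fun t => (ofLex (ofLex t).2).2) h
  simpa [pvKeyA] using this

-- ---- stability of PySem.List.sorted ----

theorem pv_insertBy_pairwise {α κ : Type} [LinearOrder κ] (key : α → κ) (Q : α → α → Prop)
    (x : α) (acc : List α)
    (hacc : acc.Pairwise (fun a b => key a < key b ∨ (key a = key b ∧ Q a b)))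
    (hx : ∀ y ∈ acc, Q y x) :
    (PySem.List.insertBy (fun a b => decide (key a < key b)) x acc).Pairwise
      (fun a b => key a < key b ∨ (key a = key b ∧ Q a b)) := by
  induction acc with
  | nil => simp [PySem.List.insertBy]
  | cons y ys ih =>
    rw [List.pairwise_cons] at hacc
    by_cases h : key x < key y
    · simp only [PySem.List.insertBy, h, decide_true, if_true]
      refine List.Pairwise.cons ?_ (List.Pairwise.cons hacc.1 hacc.2)
      intro z hz
      rcases List.mem_cons.mp hz with rfl | hz
      · exact Or.inl h
      · rcases hacc.1 z hz with h' | ⟨h', _⟩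
        · exact Or.inl (lt_trans h h')
        · exact Or.inl (h' ▸ h)
    · simp only [PySem.List.insertBy, h, decide_false]
      refine List.Pairwise.cons ?_ (ih hacc.2 (fun z hz => hx z (List.mem_cons_of_mem y hz)))
      intro z hz
      rw [PySem.List.mem_insertBy] at hz
      rcases hz with rfl | hz
      · rcases lt_or_eq_of_le (le_of_not_gt h) with h' | h'
        · exact Or.inl h'
        · exact Or.inr ⟨h', hx y (List.mem_cons_self)⟩
      · exact hacc.1 z hz

theorem pv_sorted_stable {α κ : Type} [LinearOrder κ] (xs : List α) (key : α → κ)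
    (Q : α → α → Prop) (hxs : xs.Pairwise Q) :
    (PySem.List.sorted xs key false).Pairwise
      (fun a b => key a < key b ∨ (key a = key b ∧ Q a b)) := by
  rw [PySem.List.sorted_eq_foldl_insertBy]
  -- generalized foldl induction
  suffices H : ∀ (l : List α) (acc : List α),
      acc.Pairwise (fun a b => key a < key b ∨ (key a = key b ∧ Q a b)) →
      (∀ y ∈ acc, ∀ z ∈ l, Q y z) → l.Pairwise Q →
      (l.foldl (fun acc x => PySem.List.insertBy (fun a b => decide (key a < key b)) x acc) acc).Pairwise
        (fun a b => key a < key b ∨ (key a = key b ∧ Q a b)) from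
    H xs [] (by simp) (by simp) hxs
  intro l
  induction l with
  | nil => intro acc hacc _ _; simpa using hacc
  | cons x t ih =>
    intro acc hacc hQ hl
    rw [List.pairwise_cons] at hl
    simp only [List.foldl_cons]
    refine ih _ (pv_insertBy_pairwise key Q x acc hacc (fun y hy => hQ y hy x (List.mem_cons_self))) ?_ hl.2
    intro y hy z hz
    rw [PySem.List.mem_insertBy] at hy
    rcases hy with rfl | hy
    · exact hl.1 z hz
    · exact hQ y hy z (List.mem_cons_of_mem x hz)

-- A's stacked sorts are ordered by pvKeyA
theorem pvA_pairwise (rows : List String) :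
    (PySem.List.sorted (PySem.List.sorted (PySem.List.sorted rows (fun x => x) false) pvSortByLastName false) pvSortByCount false).Pairwise
      (fun a b => pvKeyA a ≤ pvKeyA b) := by
  have h1 : (PySem.List.sorted rows (fun x => x) false).Pairwise (fun a b => a ≤ b) :=
    PySem.List.sorted_pairwise rows _
  have h2 := pv_sorted_stable (PySem.List.sorted rows (fun x => x) false) pvSortByLastName _ h1
  have h3 := pv_sorted_stable _ pvSortByCount _ h2
  refine h3.imp ?_
  intro a b hab
  simp only [pvKeyA, Prod.Lex.le_iff, ofLex_toLex]
  rcases hab with h | ⟨he, h⟩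
  · exact Or.inl h
  · exact Or.inr ⟨he, h⟩

-- ---- string facts ----

-- reference implementation of s.split(" ") on characters
def pvSplitCh : List Char → List (List Char)
  | [] => [[]]
  | c :: rest => if c = ' ' then [] :: pvSplitCh rest else (pvSplitCh rest).modifyHead (c :: ·)

theorem pv_splitOn_go_eq (fuel : Nat) : ∀ (l cur : List Char) (acc : List (List Char)),
    l.length < fuel →
    PySem.Chars.splitOn.go [' '] fuel l cur acc =
      acc.reverse ++ (pvSplitCh l).modifyHead (cur.reverse ++ ·) := by
  induction fuel with
  | zero => intro l cur acc h; omega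
  | succ f ih =>
    intro l cur acc h
    cases l with
    | nil => simp [PySem.Chars.splitOn.go, pvSplitCh]
    | cons c rest =>
      by_cases hc : c = ' '
      · subst hc
        rw [show PySem.Chars.splitOn.go [' '] (f+1) (' ' :: rest) cur acc =
              PySem.Chars.splitOn.go [' '] f rest [] (cur.reverse :: acc) by
            simp [PySem.Chars.splitOn.go, List.isPrefixOf]]
        rw [ih rest [] (cur.reverse :: acc) (by simpa using h)]
        simp only [pvSplitCh, if_true, List.reverse_nil, List.nil_append, List.reverse_cons, List.append_assoc, List.singleton_append]
        cases pvSplitCh rest <;> simp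
      · rw [show PySem.Chars.splitOn.go [' '] (f+1) (c :: rest) cur acc =
              PySem.Chars.splitOn.go [' '] f rest (c :: cur) acc by
            simp only [PySem.Chars.splitOn.go, List.isPrefixOf]
            rw [if_neg (by simp [Ne.symm hc])]]
        rw [ih rest (c :: cur) acc (by simpa using h)]
        simp only [pvSplitCh, hc, if_false, List.reverse_cons]
        cases hr : pvSplitCh rest with
        | nil => simp
        | cons a t => simp

theorem pvSplitCh_ne_nil (cs : List Char) : pvSplitCh cs ≠ [] := by
  induction cs with
  | nil => simp [pvSplitCh]
  | cons c rest ih =>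
    simp only [pvSplitCh]
    split
    · simp
    · cases h : pvSplitCh rest with
      | nil => exact absurd h ih
      | cons a t => simp

theorem pv_splitOn_eq (cs : List Char) : PySem.Chars.splitOn cs [' '] = pvSplitCh cs := by
  rw [show PySem.Chars.splitOn cs [' '] = PySem.Chars.splitOn.go [' '] (cs.length + 1) cs [] [] from rfl]
  rw [pv_splitOn_go_eq (cs.length + 1) cs [] [] (by omega)]
  cases pvSplitCh cs <;> simp

theorem pvSplitCh_append (a b : List Char) :
    pvSplitCh (a ++ ' ' :: b) = pvSplitCh a ++ pvSplitCh b := by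
  induction a with
  | nil => simp [pvSplitCh]
  | cons c rest ih =>
    by_cases hc : c = ' '
    · subst hc; simp [pvSplitCh, ih]
    · simp only [List.cons_append, pvSplitCh, hc, if_false, ih]
      cases h : pvSplitCh rest with
      | nil => exact absurd h (pvSplitCh_ne_nil rest)
      | cons x y => simp

theorem pvSplitCh_no_space (cs : List Char) (h : ' ' ∉ cs) : pvSplitCh cs = [cs] := by
  induction cs with
  | nil => simp [pvSplitCh]
  | cons c rest ih =>
    have hc : c ≠ ' ' := fun hh => h (hh ▸ List.mem_cons_self)
    simp only [pvSplitCh, hc, if_false, ih (fun hh => h (List.mem_cons_of_mem c hh))]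
    simp


-- ---- digit strings ----

def pvIsDigit (c : Char) : Prop := c ∈ ['0','1','2','3','4','5','6','7','8','9']

def pvDigs (m : Nat) : List Char :=
  if _h : m < 10 then [Nat.digitChar m] else pvDigs (m / 10) ++ [Nat.digitChar (m % 10)]
  decreasing_by exact Nat.div_lt_self (by omega) (by omega)

theorem pv_toDigitsCore_eq : ∀ (f m : Nat) (acc : List Char), m < f →
    Nat.toDigitsCore 10 f m acc = pvDigs m ++ acc := by
  intro f
  induction f with
  | zero => intro m acc h; omega
  | succ f ih =>
    intro m acc h
    by_cases h10 : m < 10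
    · have : m / 10 = 0 := Nat.div_eq_of_lt h10
      rw [show Nat.toDigitsCore 10 (f+1) m acc =
            (if m / 10 = 0 then (m % 10).digitChar :: acc
             else Nat.toDigitsCore 10 f (m / 10) ((m % 10).digitChar :: acc)) from rfl]
      rw [if_pos this, pvDigs]
      simp [h10, Nat.mod_eq_of_lt h10]
    · have hne : m / 10 ≠ 0 := by omega
      have hlt : m / 10 < f := by
        have := Nat.div_lt_self (show 0 < m by omega) (show 1 < 10 by omega)
        omega
      rw [show Nat.toDigitsCore 10 (f+1) m acc =
            (if m / 10 = 0 then (m % 10).digitChar :: acc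
             else Nat.toDigitsCore 10 f (m / 10) ((m % 10).digitChar :: acc)) from rfl]
      rw [if_neg hne, ih (m / 10) _ hlt]
      conv_rhs => rw [pvDigs]
      simp [h10]

theorem pv_toDigits_eq (m : Nat) : Nat.toDigits 10 m = pvDigs m :=
  (pv_toDigitsCore_eq (m + 1) m [] (by omega)).trans (by simp)

theorem pv_digitChar_digit {k : Nat} (h : k < 10) : pvIsDigit (Nat.digitChar k) := by
  interval_cases k <;> simp [pvIsDigit] <;> decide

theorem pv_digitChar_toNat {k : Nat} (h : k < 10) : (Nat.digitChar k).toNat = 48 + k := by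
  interval_cases k <;> decide

theorem pvDigs_digits (m : Nat) : ∀ c ∈ pvDigs m, pvIsDigit c := by
  induction m using Nat.strong_induction_on with
  | _ m ih =>
    rw [pvDigs]
    split
    · next h => intro c hc; simp at hc; subst hc; exact pv_digitChar_digit h
    · next h =>
      intro c hc
      rcases List.mem_append.mp hc with hc | hc
      · exact ih (m / 10) (Nat.div_lt_self (by omega) (by omega)) c hc
      · simp at hc; subst hc; exact pv_digitChar_digit (Nat.mod_lt _ (by omega))

theorem pvDigs_foldl (m : Nat) : ∀ a : Int,
    (pvDigs m).foldl (fun a c => 10 * a + ((c.toNat : Int) - 48)) a =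
      a * 10 ^ (pvDigs m).length + m := by
  induction m using Nat.strong_induction_on with
  | _ m ih =>
    intro a
    rw [pvDigs]
    split
    · next h => simp [pv_digitChar_toNat h]; ring
    · next h =>
      rw [List.foldl_append]
      rw [ih (m / 10) (Nat.div_lt_self (by omega) (by omega)) a]
      simp only [List.foldl_cons, List.foldl_nil, List.length_append, List.length_cons,
        List.length_nil]
      rw [pv_digitChar_toNat (Nat.mod_lt _ (by omega))]
      have : (m : Int) = 10 * ((m / 10 : Nat) : Int) + ((m % 10 : Nat) : Int) := by
        omega
      rw [this]; push_cast; ring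

theorem pv_parse_toChars {n : Int} (h : 1 ≤ n) : pvParseInt (PySem.Int.toChars n) = n := by
  rw [PySem.Int.toChars, if_neg (by omega)]
  rw [pv_toDigits_eq]
  unfold pvParseInt
  rw [pvDigs_foldl n.toNat 0]
  simp [Int.toNat_of_nonneg (by omega : (0:Int) ≤ n)]

theorem pv_toChars_digits {n : Int} (h : 1 ≤ n) : ∀ c ∈ PySem.Int.toChars n, pvIsDigit c := by
  rw [PySem.Int.toChars, if_neg (by omega), pv_toDigits_eq]
  exact pvDigs_digits n.toNat

-- ---- the two key agreement lemmas ----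


-- ---- rstrip facts ----

theorem pvRstrip_append_ne (a b chars : List Char) (h : pvRstrip b chars ≠ []) :
    pvRstrip (a ++ b) chars = a ++ pvRstrip b chars := by
  unfold pvRstrip at *
  rw [List.reverse_append, List.dropWhile_append, if_neg ?hne, List.reverse_append]
  · simp
  case hne =>
    intro hemp
    rw [List.isEmpty_iff] at hemp
    exact h (by rw [hemp]; rfl)

theorem pvRstrip_append_eq_nil (a b chars : List Char) (h : pvRstrip b chars = []) :
    pvRstrip (a ++ b) chars = pvRstrip a chars := by
  unfold pvRstrip at *
  rw [List.reverse_append, List.dropWhile_append, if_pos]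
  rw [List.isEmpty_iff]
  simpa using congrArg List.reverse h

theorem pvRstrip_all_mem (b chars : List Char) (h : ∀ x ∈ b, chars.contains x = true) :
    pvRstrip b chars = [] := by
  unfold pvRstrip
  rw [List.dropWhile_eq_nil_iff.mpr (by intro x hx; exact h x (List.mem_reverse.mp hx))]
  rfl

theorem pv_dropWhile_id {p : Char → Bool} (l : List Char) (h : ∀ x ∈ l, p x = false) :
    List.dropWhile p l = l := by
  cases l with
  | nil => rfl
  | cons a t => rw [List.dropWhile_cons, if_neg (by simp [h a List.mem_cons_self])]

theorem pv_stripChars_id (s chars : List Char) (h : ∀ x ∈ s, chars.contains x = false) :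
    PySem.Chars.stripChars s chars = s := by
  rw [show PySem.Chars.stripChars s chars =
      (List.dropWhile (fun c => chars.contains c)
        (List.dropWhile (fun c => chars.contains c) s).reverse).reverse from rfl]
  rw [pv_dropWhile_id s h]
  rw [pv_dropWhile_id s.reverse (fun x hx => h x (List.mem_reverse.mp hx)), List.reverse_reverse]

-- character-class facts about digits
theorem pv_digit_strip (c : Char) (h : pvIsDigit c) : pvStripSet.contains c = true := by
  unfold pvIsDigit at h; fin_cases h <;> decide

theorem pv_digit_not_space_pipe (c : Char) (h : pvIsDigit c) : ([' ','|'].contains c) = false := by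
  unfold pvIsDigit at h; fin_cases h <;> decide

theorem pv_digit_ne_space (c : Char) (h : pvIsDigit c) : c ≠ ' ' := by
  unfold pvIsDigit at h; fin_cases h <;> decide

theorem pv_sortByCount_row (c : String) (n : Int) (h : 1 ≤ n) :
    pvSortByCount (pvFormatRow c n) = -n := by
  have hT : ' ' ∉ PySem.Int.toChars n := fun hm =>
    pv_digit_ne_space ' ' (pv_toChars_digits h ' ' hm) rfl
  have hrow : (pvFormatRow c n).toList =
      '|' :: ' ' :: (c.toList ++ ' ' :: ('|' :: ' ' :: (PySem.Int.toChars n ++ ' ' :: ['|']))) := by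
    simp [pvFormatRow]
  unfold pvSortByCount
  rw [hrow, pv_splitOn_eq]
  rw [show pvSplitCh ('|' :: ' ' :: (c.toList ++ ' ' :: ('|' :: ' ' :: (PySem.Int.toChars n ++ ' ' :: ['|'])))) =
        ['|'] :: (pvSplitCh c.toList ++ ['|'] :: (pvSplitCh (PySem.Int.toChars n) ++ [['|']])) by
    simp only [pvSplitCh, if_neg (by decide : ¬('|' = ' ')), pvSplitCh_append]
    simp]
  rw [pvSplitCh_no_space _ hT]
  rw [show ['|'] :: (pvSplitCh c.toList ++ ['|'] :: ([PySem.Int.toChars n] ++ [['|']])) =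
        (['|'] :: (pvSplitCh c.toList ++ [['|']])) ++ [PySem.Int.toChars n, ['|']] by simp]
  rw [PySem.List.pyGet?_neg_ofNat _ 2 (by omega) (by simp)]
  rw [show (['|'] :: (pvSplitCh c.toList ++ [['|']]) ++ [PySem.Int.toChars n, ['|']]).length - 2 =
        (['|'] :: (pvSplitCh c.toList ++ [['|']])).length by simp]
  rw [List.getElem?_append_right (by omega)]
  simp only [Nat.sub_self, List.getElem?_cons_zero, Option.getD_some]
  rw [pv_stripChars_id _ _ (fun x hx => pv_digit_not_space_pipe x (pv_toChars_digits h x hx))]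
  rw [pv_parse_toChars h]

theorem pv_sortByLastName_row (c : String) (n : Int) (h : 1 ≤ n) :
    pvSortByLastName (pvFormatRow c n) = pvLastName c := by
  have hrow : (pvFormatRow c n).toList =
      (['|',' '] ++ c.toList) ++ ([' ','|',' '] ++ PySem.Int.toChars n ++ [' ','|']) := by
    simp [pvFormatRow]
  unfold pvSortByLastName pvLastName
  rw [hrow]
  rw [pvRstrip_append_eq_nil _ _ _ (pvRstrip_all_mem _ _ (by
    intro x hx
    have hd : x = ' ' ∨ x = '|' ∨ x ∈ PySem.Int.toChars n := by
      simp only [List.mem_append, List.mem_cons, List.not_mem_nil, or_false] at hx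
      tauto
    rcases hd with rfl | rfl | hd
    · decide
    · decide
    · exact pv_digit_strip x (pv_toChars_digits h x hd)))]
  by_cases hc : pvRstrip c.toList pvStripSet = []
  · rw [show ['|',' '] ++ c.toList = ['|',' '] ++ c.toList from rfl]
    rw [pvRstrip_append_eq_nil _ _ _ hc, hc]
    rw [show pvRstrip ['|',' '] pvStripSet = [] from by decide]
  · rw [pvRstrip_append_ne _ _ _ hc]
    rw [pv_splitOn_eq, pv_splitOn_eq]
    rw [show ['|',' '] ++ pvRstrip c.toList pvStripSet = ['|'] ++ ' ' :: pvRstrip c.toList pvStripSet by simp]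
    rw [pvSplitCh_append]
    rw [PySem.List.pyGet?_neg_one, PySem.List.pyGet?_neg_one]
    rw [show pvSplitCh ['|'] = [['|']] by decide]
    rw [List.getLast?_append_of_ne_nil _ (pvSplitCh_ne_nil _)]

theorem pvKeyA_row (p : String × Int) (h : 1 ≤ p.2) :
    pvKeyA (pvFormatRow p.1 p.2) = pvKeyB p := by
  simp [pvKeyA, pvKeyB, pv_sortByCount_row _ _ h, pv_sortByLastName_row _ _ h]

-- ---- main ----

theorem pv_rows_eq (raw : List String) :
    PySem.List.sorted (PySem.List.sorted (PySem.List.sorted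
        ((PySem.List.sorted (PySem.Dict.counter raw).items (fun p => p.2) true).map (fun p => pvFormatRow p.1 p.2))
        (fun x => x) false) pvSortByLastName false) pvSortByCount false =
      (PySem.List.sorted (PySem.Dict.counter raw).items pvKeyB false).map (fun p => pvFormatRow p.1 p.2) := by
  have hcount : ∀ p ∈ (PySem.Dict.counter raw).items, 1 ≤ p.2 := by
    intro p hp
    rw [PySem.Dict.items_counter] at hp
    obtain ⟨k, hk, rfl⟩ := List.mem_map.mp hp
    have : k ∈ raw := (PySem.Set.mem_ofList raw k).mp hk
    simpa using List.one_le_count_iff.mpr this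
  -- permutation between the two row lists
  have hperm : (PySem.List.sorted (PySem.List.sorted (PySem.List.sorted
        ((PySem.List.sorted (PySem.Dict.counter raw).items (fun p => p.2) true).map (fun p => pvFormatRow p.1 p.2))
        (fun x => x) false) pvSortByLastName false) pvSortByCount false).Perm
      ((PySem.List.sorted (PySem.Dict.counter raw).items pvKeyB false).map (fun p => pvFormatRow p.1 p.2)) := by
    refine ((PySem.List.sorted_perm _ _ _).trans ((PySem.List.sorted_perm _ _ _).trans
      ((PySem.List.sorted_perm _ _ _).trans ((PySem.List.sorted_perm _ _ _).map _)))).trans ?_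
    exact ((PySem.List.sorted_perm _ _ _).map _).symm
  -- both sides pairwise-ordered by pvKeyA
  have hA := pvA_pairwise ((PySem.List.sorted (PySem.Dict.counter raw).items (fun p => p.2) true).map (fun p => pvFormatRow p.1 p.2))
  have hB : ((PySem.List.sorted (PySem.Dict.counter raw).items pvKeyB false).map (fun p => pvFormatRow p.1 p.2)).Pairwise
      (fun a b => pvKeyA a ≤ pvKeyA b) := by
    rw [List.pairwise_map]
    refine (PySem.List.sorted_pairwise (PySem.Dict.counter raw).items pvKeyB).imp_of_mem ?_
    intro p q hp hq hpq
    have hp' := (PySem.List.mem_sorted _ _ _ _).mp hp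
    have hq' := (PySem.List.mem_sorted _ _ _ _).mp hq
    rw [pvKeyA_row p (hcount p hp'), pvKeyA_row q (hcount q hq')]
    exact hpq
  exact PySem.List.eq_of_perm_of_pairwise_le_of_injective pvKeyA pvKeyA_injective hperm hA hB

-- ===== VERDICT (by name: the statement is the Claim_ definition above) =====
theorem generate_markdown_table_for_count_spec : Claim_equal_generate_markdown_table_for_count := by
  intro raw headers _
  show _ = _
  unfold generate_markdown_table_for_count generate_markdown_table_for_count_alt
  simp only [pv_rows_eq raw]
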